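-- pv_equiv track=rewrite | github.com/Osnott/tcp-udp-2019 | Client/client_handler.py | calculatePings
-- ===== SOURCE A (Python) =====
-- def calculatePings(pings):
--     """
--     Calculates top and total pings
--     """
--     top_ping = 0
--     all_pings = 0
--     if len(pings) >= 900:
--         pings.clear()
--         pings.append(0)
--     for ping in pings:
--         if ping > top_ping:
--             top_ping = ping
--         all_pings += ping
--     return top_ping, all_pings, pings
-- ===== SOURCE B (Python) =====
-- def calculatePings(pings):
--     """
--     Calculates top and total pings
--     """
--     if len(pings) >= 900:
--         pings.clear()
--         pings.append(0)
--     top_ping, all_pings = _reduce(pings, 0, len(pings))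
--     return top_ping, all_pings, pings
--
--
-- def _reduce(xs, lo, hi):
--     # divide-and-conquer reduction over xs[lo:hi]: (max of elements clamped at 0, sum)
--     if lo == hi:
--         return 0, 0
--     if hi - lo == 1:
--         p = xs[lo]
--         return (p if p > 0 else 0), p
--     mid = (lo + hi) // 2
--     t1, s1 = _reduce(xs, lo, mid)
--     t2, s2 = _reduce(xs, mid, hi)
--     return (t1 if t1 > t2 else t2), s1 + s2
-- ===== Notes on version B (the rewrite author's own statement) =====
-- stated objective: alternative
-- what changed: Replaces A's single fused left-to-right accumulation loop with a recursive divide-and-conquer reduction over index ranges that computes (clamped max, sum) of each half and merges them; the >=900 reset is kept.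
import Mathlib
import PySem

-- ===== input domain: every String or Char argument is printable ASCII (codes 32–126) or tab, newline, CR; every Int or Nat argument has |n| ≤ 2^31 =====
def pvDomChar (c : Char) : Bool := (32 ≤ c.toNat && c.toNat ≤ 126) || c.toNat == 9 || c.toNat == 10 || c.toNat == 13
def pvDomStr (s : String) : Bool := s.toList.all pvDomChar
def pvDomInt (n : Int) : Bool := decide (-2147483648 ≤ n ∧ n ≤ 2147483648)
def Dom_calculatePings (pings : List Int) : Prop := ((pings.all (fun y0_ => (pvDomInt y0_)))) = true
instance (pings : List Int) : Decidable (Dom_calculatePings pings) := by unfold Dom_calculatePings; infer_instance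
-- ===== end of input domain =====

-- B replaces A's fused left-to-right loop with a divide-and-conquer reduction over index
-- ranges; alternative decomposition, same O(n) cost. A mutates its argument (clear/append)
-- when len >= 900; B performs the same mutation; the theorem is about the return value.

-- ===== PORT A =====
def calculatePings (pings : List Int) : Int × Int × List Int :=
  -- top_ping = 0; all_pings = 0; reset if len >= 900; fused loop over pings
  let pings := if pings.length ≥ 900 then [0] else pings
  let s := pings.foldl
    (fun (s : Int × Int) ping =>
      ((if ping > s.1 then ping else s.1), s.2 + ping)) (0, 0)
  (s.1, s.2, pings)

-- ===== PORT B =====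
-- _reduce(xs, lo, hi): divide-and-conquer over xs[lo:hi]; xs[lo] is in range on every
-- recursive call made by calculatePings_alt, so pyGet? returns some there (getD 0 is unreached).
def pvReduce (xs : List Int) (lo hi : Nat) : Int × Int :=
  -- guard written as 'hi ≤ lo' (instead of Python's 'lo == hi') only to make the
  -- recursion total; calculatePings_alt only ever calls it with lo ≤ hi, where both agree
  if h0 : hi ≤ lo then (0, 0)
  else if h1 : hi - lo = 1 then
    let p := (PySem.List.pyGet? xs (Int.ofNat lo)).getD 0
    ((if p > 0 then p else 0), p)
  else
    let mid := (lo + hi) / 2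
    let r1 := pvReduce xs lo mid
    let r2 := pvReduce xs mid hi
    ((if r1.1 > r2.1 then r1.1 else r2.1), r1.2 + r2.2)
termination_by hi - lo
decreasing_by all_goals omega

def calculatePings_alt (pings : List Int) : Int × Int × List Int :=
  let pings := if pings.length ≥ 900 then [0] else pings
  let r := pvReduce pings 0 pings.length
  (r.1, r.2, pings)

-- ===== PRECONDITION & SPEC =====
def Spec_calculatePings (pings : List Int) (out : Int × Int × List Int) : Prop := out = calculatePings_alt pings
instance (pings : List Int) (out : Int × Int × List Int) : Decidable (Spec_calculatePings pings out) := by unfold Spec_calculatePings; infer_instance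

-- ===== CLAIM (what is proved, stated in full; the proofs are below) =====
def Claim_equal_calculatePings : Prop := ∀ (pings : List Int), Dom_calculatePings pings → Spec_calculatePings pings (calculatePings pings)

-- ===== LEMMAS AND PROOFS =====

theorem pv_fold_pair (l : List Int) : ∀ (a b : Int),
    l.foldl (fun (s : Int × Int) ping => ((if ping > s.1 then ping else s.1), s.2 + ping)) (a, b)
      = (l.foldl (fun x p => max x p) a, b + l.sum) := by
  induction l with
  | nil => intro a b; simp
  | cons x t ih =>
      intro a b
      simp only [List.foldl_cons, List.sum_cons, ih]
      rw [show (if x > a then x else a) = max a x from by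
        rcases le_or_gt a x with h | h
        · rw [max_eq_right h]; split <;> omega
        · rw [max_eq_left (le_of_lt h)]; split <;> omega]
      simp [add_assoc]

theorem pv_foldl_max_acc (l : List Int) : ∀ (a b : Int),
    l.foldl (fun x p => max x p) (max a b) = max a (l.foldl (fun x p => max x p) b) := by
  induction l with
  | nil => intro a b; simp
  | cons x t ih =>
      intro a b
      simp only [List.foldl_cons, max_assoc, ih]

theorem pv_le_foldl_max (l : List Int) : ∀ b : Int, b ≤ l.foldl (fun x p => max x p) b := by
  induction l with
  | nil => intro b; simp
  | cons x t ih => intro b; exact le_trans (le_max_left b x) (ih (max b x))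

-- pvReduce on a valid range computes (clamped max, sum) of the segment xs[lo:hi]
theorem pvReduce_spec (xs : List Int) : ∀ (n lo hi : Nat), hi - lo = n → lo ≤ hi → hi ≤ xs.length →
    pvReduce xs lo hi =
      (((xs.drop lo).take (hi - lo)).foldl (fun x p => max x p) 0,
       ((xs.drop lo).take (hi - lo)).sum) := by
  intro n
  induction n using Nat.strong_induction_on with
  | _ n ih =>
    intro lo hi hn hle hlen
    rw [pvReduce]
    by_cases h0 : hi ≤ lo
    · have : lo = hi := by omega
      subst this; simp
    · rw [dif_neg h0]
      by_cases h1 : hi - lo = 1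
      · rw [dif_pos h1, h1]
        have hlt : lo < xs.length := by omega
        have hget : (PySem.List.pyGet? xs (Int.ofNat lo)).getD 0 = xs[lo] := by
          simp [PySem.List.pyGet?, PySem.List.pyIdx?, hlt]
        have hseg : (xs.drop lo).take 1 = [xs[lo]] := by
          rw [List.take_one, List.head?_drop, List.getElem?_eq_getElem hlt]
          rfl
        rw [hget, hseg]
        simp only [List.foldl_cons, List.foldl_nil, List.sum_cons, List.sum_nil, add_zero,
          Prod.mk.injEq]
        refine ⟨?_, trivial⟩
        rcases le_or_gt (xs[lo]) 0 with h | h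
        · rw [if_neg (by omega), max_eq_left h]
        · rw [if_pos h, max_eq_right (le_of_lt h)]
      · rw [dif_neg h1]
        have hmidlo : lo < (lo + hi) / 2 := by omega
        have hmidhi : (lo + hi) / 2 < hi := by omega
        set mid := (lo + hi) / 2 with hm
        have e1 := ih (mid - lo) (by omega) lo mid rfl (by omega) (by omega)
        have e2 := ih (hi - mid) (by omega) mid hi rfl (by omega) hlen
        simp only [e1, e2]
        have hsplit : (xs.drop lo).take (hi - lo)
            = (xs.drop lo).take (mid - lo) ++ ((xs.drop mid).take (hi - mid)) := by
          have h := List.take_add (l := xs.drop lo) (i := mid - lo) (j := hi - mid)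
          rw [List.drop_drop] at h
          rw [show lo + (mid - lo) = mid by omega] at h
          rw [show hi - lo = (mid - lo) + (hi - mid) by omega]
          exact h
        rw [hsplit, List.foldl_append, List.sum_append, Prod.mk.injEq]
        refine ⟨?_, rfl⟩
        rw [show ((xs.drop mid).take (hi - mid)).foldl (fun x p => max x p)
              (((xs.drop lo).take (mid - lo)).foldl (fun x p => max x p) 0)
            = max (((xs.drop lo).take (mid - lo)).foldl (fun x p => max x p) 0)
                (((xs.drop mid).take (hi - mid)).foldl (fun x p => max x p) 0) from by
          have h := pv_foldl_max_acc ((xs.drop mid).take (hi - mid))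
            (((xs.drop lo).take (mid - lo)).foldl (fun x p => max x p) 0) 0
          rw [max_eq_left (pv_le_foldl_max ((xs.drop lo).take (mid - lo)) 0)] at h
          exact h]
        rcases le_or_gt (((xs.drop lo).take (mid - lo)).foldl (fun x p => max x p) 0)
          (((xs.drop mid).take (hi - mid)).foldl (fun x p => max x p) 0) with h | h
        · rw [max_eq_right h]; split <;> omega
        · rw [max_eq_left (le_of_lt h)]; split <;> omega

theorem calculatePings_eq (pings : List Int) : calculatePings pings = calculatePings_alt pings := by
  unfold calculatePings calculatePings_alt
  set l := if pings.length ≥ 900 then [0] else pings with hl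
  simp only [pv_fold_pair, zero_add]
  rw [pvReduce_spec l l.length 0 l.length rfl (Nat.zero_le _) le_rfl]
  simp

-- ===== VERDICT (by name: the statement is the Claim_ definition above) =====
theorem calculatePings_spec : Claim_equal_calculatePings := by
  intro pings _
  unfold Spec_calculatePings
  exact calculatePings_eq pings
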